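-- pv_equiv track=rewrite | github.com/tobeannouncd/AdventOfCode | 2017/day4.py | part_one
-- ===== SOURCE A (Python) =====
-- def part_one(phrase_list):
--     cnt = 0
--     for phrase in phrase_list:
--         word_list = phrase.split()
--         word_set = set(word_list)
--         if len(word_list) == len(word_set):
--             cnt += 1
--     return cnt
-- ===== SOURCE B (Python) =====
-- def part_one(phrase_list):
--     cnt = 0
--     for phrase in phrase_list:
--         words = sorted(phrase.split())
--         if all(a != b for a, b in zip(words, words[1:])):
--             cnt += 1
--     return cnt
-- ===== Notes on version B (the rewrite author's own statement) =====
-- stated objective: alternative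
-- what changed: Replaces the per-phrase set construction and length comparison with sorting the words and checking that no two adjacent sorted words are equal.
import Mathlib
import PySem

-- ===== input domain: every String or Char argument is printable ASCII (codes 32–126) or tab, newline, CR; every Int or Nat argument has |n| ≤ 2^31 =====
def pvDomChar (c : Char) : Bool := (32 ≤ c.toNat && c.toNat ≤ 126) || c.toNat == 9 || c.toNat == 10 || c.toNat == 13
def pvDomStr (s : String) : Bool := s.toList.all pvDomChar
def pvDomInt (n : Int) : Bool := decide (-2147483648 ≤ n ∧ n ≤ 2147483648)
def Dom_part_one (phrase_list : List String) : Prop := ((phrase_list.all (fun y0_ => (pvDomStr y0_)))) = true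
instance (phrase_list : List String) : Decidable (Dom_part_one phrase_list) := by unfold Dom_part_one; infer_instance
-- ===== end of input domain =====

-- B replaces A's set-build-and-compare-lengths test by sorting each phrase's words
-- and checking adjacent sorted words for equality (alternative algorithm, same cost class).

-- ===== PORT A =====
def part_one (phrase_list : List String) : Int :=
  phrase_list.foldl (fun cnt phrase =>
    let word_list := PySem.Str.split₀ phrase
    let word_set := PySem.Set.ofList word_list
    if word_list.length == word_set.length then cnt + 1 else cnt) 0

-- ===== PORT B =====
def part_one_alt (phrase_list : List String) : Int :=
  phrase_list.foldl (fun cnt phrase =>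
    let words := PySem.List.sorted (PySem.Str.split₀ phrase) (fun x => x) false
    if (words.zip (PySem.List.slice words (some 1) none)).all (fun p => p.1 != p.2)
    then cnt + 1 else cnt) 0

-- ===== PRECONDITION & SPEC =====
def Spec_part_one (phrase_list : List String) (out : Int) : Prop := out = part_one_alt phrase_list
instance (phrase_list : List String) (out : Int) : Decidable (Spec_part_one phrase_list out) := by unfold Spec_part_one; infer_instance

-- ===== CLAIM (what is proved, stated in full; the proofs are below) =====
def Claim_equal_part_one : Prop := ∀ (phrase_list : List String), Dom_part_one phrase_list → Spec_part_one phrase_list (part_one phrase_list)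

-- ===== LEMMAS AND PROOFS =====

-- the all-over-zip-with-tail test is exactly the adjacent-pairs chain condition
lemma zip_tail_all_ne {α : Type} [DecidableEq α] (ys : List α) :
    ((ys.zip ys.tail).all (fun p => p.1 != p.2) = true) ↔ List.IsChain (· ≠ ·) ys := by
  induction ys with
  | nil => simp
  | cons a t ih =>
    cases t with
    | nil => simp
    | cons b u =>
      simp only [List.tail_cons, List.zip_cons_cons, List.all_cons, Bool.and_eq_true,
        List.isChain_cons_cons, bne_iff_ne] at *
      exact and_congr Iff.rfl ih

-- adjacent inequality on a weakly increasing list makes it strictly increasing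
lemma isChain_lt_of_ne_le (ys : List String)
    (h1 : List.IsChain (· ≠ ·) ys) (h2 : List.IsChain (fun a b : String => a ≤ b) ys) :
    List.IsChain (· < ·) ys := by
  induction ys with
  | nil => simp
  | cons a t ih =>
    cases t with
    | nil => simp
    | cons b u =>
      simp only [List.isChain_cons_cons] at *
      exact ⟨lt_of_le_of_ne h2.1 h1.1, ih h1.2 h2.2⟩

-- A's per-phrase test: len(word_list) == len(set(word_list)) iff the word list has no duplicates
lemma len_eq_len_ofList_iff (ws : List String) :
    (ws.length == (PySem.Set.ofList ws).length) = true ↔ ws.Nodup := by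
  constructor
  · intro h
    have hlen : ws.length = (PySem.Set.ofList ws).length := by simpa using h
    have hnd := PySem.Set.nodup_ofList (xs := ws)
    have hfin : (PySem.Set.ofList ws).toFinset = ws.toFinset := by
      ext x
      simp [List.mem_toFinset, PySem.Set.mem_ofList]
    have hcard : ws.toFinset.card = ws.length := by
      rw [← hfin, List.toFinset_card_of_nodup hnd, ← hlen]
    have : Multiset.toFinset (↑ws : Multiset String) = ws.toFinset := rfl
    have := Multiset.toFinset_card_eq_card_iff_nodup.mp (by simpa [this] using hcard)
    simpa using this
  · intro h
    rw [PySem.Set.ofList_eq_self_of_nodup ws h]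
    simp

-- B's per-phrase test: no equal adjacent pair in the sorted word list iff no duplicates
lemma sorted_adj_iff_nodup (ws : List String) :
    (((PySem.List.sorted ws (fun x => x) false).zip
        (PySem.List.slice (PySem.List.sorted ws (fun x => x) false) (some 1) none)).all
      (fun p => p.1 != p.2) = true) ↔ ws.Nodup := by
  have hperm := PySem.List.sorted_perm ws (fun x => x) false
  have hle : (PySem.List.sorted ws (fun x => x) false).Pairwise (fun a b : String => a ≤ b) := by
    simpa using PySem.List.sorted_pairwise ws (fun x => x)
  rw [PySem.List.slice_from_one, zip_tail_all_ne]
  constructor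
  · intro hch
    have hlt := isChain_lt_of_ne_le _ hch hle.isChain
    have hpw : (PySem.List.sorted ws (fun x => x) false).Pairwise (· < ·) := hlt.pairwise
    exact (List.Perm.nodup_iff hperm).mp (hpw.imp ne_of_lt)
  · intro hnd
    exact ((List.Perm.nodup_iff hperm).mpr hnd).isChain

-- ===== VERDICT (by name: the statement is the Claim_ definition above) =====
theorem part_one_spec : Claim_equal_part_one := by
  intro pl _
  unfold Spec_part_one part_one part_one_alt
  congr 1
  funext cnt phrase
  simp only []
  by_cases h : (PySem.Str.split₀ phrase).Nodup
  · rw [if_pos ((len_eq_len_ofList_iff _).mpr h), if_pos ((sorted_adj_iff_nodup _).mpr h)]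
  · rw [if_neg (fun hc => h ((len_eq_len_ofList_iff _).mp hc)),
        if_neg (fun hc => h ((sorted_adj_iff_nodup _).mp hc))]
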